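-- pv_equiv track=rewrite | github.com/runtimeverification/khoon | src/khoon/parser.py | _alt_subst
-- ===== SOURCE A (Python) =====
-- def _alt_subst(s1: str, s2: str) -> str:
--     new = []
--     for i in range(0, len(s1)):
--         if i % 2:
--             new.append(s2)
--         else:
--             new.append(s1[i])
--     return ''.join(new)
-- ===== SOURCE B (Python) =====
-- def _alt_subst(s1: str, s2: str) -> str:
--     out = []
--     for i in range(0, len(s1), 2):
--         out.append(s1[i])
--         if i + 1 < len(s1):
--             out.append(s2)
--     return ''.join(out)
-- ===== Notes on version B (the rewrite author's own statement) =====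
-- stated objective: alternative
-- what changed: B walks even indices only with a step-2 loop, emitting the kept char and then s2 whenever a following odd position exists, instead of A's per-index parity branch over every position.
import Mathlib
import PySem

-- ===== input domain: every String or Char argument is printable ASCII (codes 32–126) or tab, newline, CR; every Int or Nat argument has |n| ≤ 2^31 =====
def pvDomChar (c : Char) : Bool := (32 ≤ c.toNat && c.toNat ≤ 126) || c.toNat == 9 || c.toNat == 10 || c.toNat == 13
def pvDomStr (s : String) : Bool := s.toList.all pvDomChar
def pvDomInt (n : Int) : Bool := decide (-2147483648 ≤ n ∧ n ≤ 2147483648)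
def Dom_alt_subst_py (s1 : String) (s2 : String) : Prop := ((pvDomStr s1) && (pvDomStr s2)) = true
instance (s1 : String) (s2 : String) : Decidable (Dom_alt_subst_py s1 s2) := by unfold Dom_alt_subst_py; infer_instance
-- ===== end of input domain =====

-- B replaces A's per-index parity branch by a step-2 walk over even indices (alternative decomposition, same cost).

-- ===== PORT A =====
-- for i in range(0, len(s1)): if i % 2: new.append(s2) else: new.append(s1[i]); ''.join(new)
-- (the index i is always in range, so the pyGetD default ' ' is never used)
def alt_subst_py (s1 : String) (s2 : String) : String :=
  let new : List String :=
    (PySem.List.pyRange 0 (PySem.Str.len s1) 1).foldl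
      (fun acc i =>
        if PySem.Int.mod i 2 ≠ 0 then acc ++ [s2]
        else acc ++ [String.ofList [PySem.List.pyGetD s1.toList i ' ']])
      []
  PySem.Str.join "" new

-- ===== PORT B =====
-- step-2 loop of Source B: each step consumes the even-index char (and skips the odd one),
-- appending s1[i] and then s2 when a following odd index exists
def altSubstGo (s2 : List Char) : List Char → List (List Char)
  | [] => []
  | [c] => [[c]]
  | c :: _ :: rest => [c] :: s2 :: altSubstGo s2 rest

def alt_subst_py_alt (s1 : String) (s2 : String) : String :=
  String.ofList (PySem.Chars.join [] (altSubstGo s2.toList s1.toList))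

-- ===== PRECONDITION & SPEC =====
def Spec_alt_subst_py (s1 : String) (s2 : String) (out : String) : Prop := out = alt_subst_py_alt s1 s2
instance (s1 : String) (s2 : String) (out : String) : Decidable (Spec_alt_subst_py s1 s2 out) := by unfold Spec_alt_subst_py; infer_instance

-- ===== CLAIM (what is proved, stated in full; the proofs are below) =====
def Claim_equal_alt_subst_py : Prop := ∀ (s1 : String) (s2 : String), Dom_alt_subst_py s1 s2 → Spec_alt_subst_py s1 s2 (alt_subst_py s1 s2)

-- ===== LEMMAS AND PROOFS =====

theorem joinNilCons (a : List Char) (l : List (List Char)) :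
    PySem.Chars.join [] (a :: l) = a ++ PySem.Chars.join [] l := by
  cases l with
  | nil => simp [PySem.Chars.join_singleton, PySem.Chars.join_nil]
  | cons b t => simp [PySem.Chars.join_cons_cons]

-- the piece A emits at index k
def altSubstPiece (cs : List Char) (s2 : String) (k : Nat) : String :=
  if (k % 2 : Nat) ≠ 0 then s2 else String.ofList [cs.getD k ' ']

theorem altSubst_pieces_join (s2 : String) (cs : List Char) :
    PySem.Chars.join [] (((List.range cs.length).map (altSubstPiece cs s2)).map String.toList)
      = PySem.Chars.join [] (altSubstGo s2.toList cs) := by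
  match cs with
  | [] => rfl
  | [c] => simp [altSubstPiece, altSubstGo, PySem.Chars.join]
  | c :: d :: rest =>
    have ih := altSubst_pieces_join s2 rest
    simp only [List.map_map] at ih
    have hr : List.range (c :: d :: rest).length
        = 0 :: 1 :: (List.range rest.length).map (fun k => k + 2) := by
      simp [List.range_succ_eq_map, List.map_map, Function.comp]
    have hp : ∀ k, altSubstPiece (c :: d :: rest) s2 (k + 2) = altSubstPiece rest s2 k := by
      intro k
      simp [altSubstPiece, Nat.add_mod_right]
    rw [hr]
    simp only [List.map_cons, List.map_map]
    have hmap : (List.range rest.length).map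
          (String.toList ∘ altSubstPiece (c :: d :: rest) s2 ∘ fun k => k + 2)
        = (List.range rest.length).map (String.toList ∘ altSubstPiece rest s2) :=
      List.map_congr_left (fun k _ => by simp [Function.comp, hp])
    rw [hmap]
    simp only [altSubstGo]
    rw [joinNilCons, joinNilCons, joinNilCons, joinNilCons, ih]
    simp [altSubstPiece]
termination_by cs.length

-- ===== VERDICT (by name: the statement is the Claim_ definition above) =====
theorem alt_subst_py_spec : Claim_equal_alt_subst_py := by
  intro s1 s2 _
  unfold Spec_alt_subst_py alt_subst_py alt_subst_py_alt
  have hn : PySem.Str.len s1 = (s1.toList.length : Int) := by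
    simp
  rw [hn, PySem.List.pyRange_zero_nat]
  have hf : (fun (acc : List String) (i : Int) =>
        if PySem.Int.mod i 2 ≠ 0 then acc ++ [s2]
        else acc ++ [String.ofList [PySem.List.pyGetD s1.toList i ' ']])
      = fun acc i => acc ++ [if PySem.Int.mod i 2 ≠ 0 then s2
        else String.ofList [PySem.List.pyGetD s1.toList i ' ']] := by
    funext acc i; split_ifs <;> rfl
  rw [hf, List.foldl_map, PySem.List.foldl_append_singleton_eq_map]
  simp only [List.nil_append]
  have hg : ∀ y ∈ List.range s1.toList.length,
      (if PySem.Int.mod (y : Int) 2 ≠ 0 then s2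
       else String.ofList [PySem.List.pyGetD s1.toList (y : Int) ' '])
        = altSubstPiece s1.toList s2 y := by
    intro y _
    by_cases h : y % 2 = 0 <;>
      simp [altSubstPiece, PySem.List.pyGetD_natCast, h] <;>
      (intro hc; exact absurd hc (by omega))
  rw [List.map_congr_left hg]
  apply String.toList_inj.mp
  rw [PySem.Str.toList_join]
  simpa using altSubst_pieces_join s2 s1.toList
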